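-- pv_equiv track=rewrite | github.com/rosettatype/hyperglot | readers.py | iso_from_cldr
-- ===== SOURCE A (Python) =====
-- def iso_from_cldr(code, iso_639_3):
--     """
--     Get ISO 639-3 code for a corresponding CLDR code.
--     """
--
--     code_ = code.split("-")[0]
--     if code_ in iso_639_3.keys():
--         return code_
--     else:
--         for iso, r in iso_639_3.items():
--             if code_ == r["639-2B"]:
--                 return iso
--             elif code_ == r["639-2T"]:
--                 return iso
--             elif code_ == r["639-1"]:
--                 return iso
-- ===== SOURCE B (Python) =====
-- def iso_from_cldr(code, iso_639_3):
--     """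
--     Get ISO 639-3 code for a corresponding CLDR code.
--     """
--     code_ = code.split("-")[0]
--     if code_ in iso_639_3:
--         return code_
--     index = {}
--     for iso, r in iso_639_3.items():
--         for key in ("639-2B", "639-2T", "639-1"):
--             v = r.get(key)
--             if v is not None:
--                 index.setdefault(v, iso)
--     return index.get(code_)
-- ===== Notes on version B (the rewrite author's own statement) =====
-- stated objective: alternative
-- what changed: Replaces the per-entry three-way comparison scan with a reverse-lookup index built once by first-wins setdefault over the present alias codes, followed by a single dict lookup.
import Mathlib
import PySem

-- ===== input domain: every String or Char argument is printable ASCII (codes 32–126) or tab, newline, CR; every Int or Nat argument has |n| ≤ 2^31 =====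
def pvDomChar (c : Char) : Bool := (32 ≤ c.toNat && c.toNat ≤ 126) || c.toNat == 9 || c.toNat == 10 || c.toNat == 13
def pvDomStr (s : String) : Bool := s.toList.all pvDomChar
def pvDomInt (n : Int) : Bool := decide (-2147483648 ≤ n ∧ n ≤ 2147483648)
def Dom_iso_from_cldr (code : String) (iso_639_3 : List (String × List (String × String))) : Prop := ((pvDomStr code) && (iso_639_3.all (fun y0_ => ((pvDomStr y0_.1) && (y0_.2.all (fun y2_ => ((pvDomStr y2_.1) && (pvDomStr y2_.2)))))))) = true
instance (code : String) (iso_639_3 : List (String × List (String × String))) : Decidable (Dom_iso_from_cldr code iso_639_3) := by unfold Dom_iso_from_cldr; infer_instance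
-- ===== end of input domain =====

-- B replaces A's per-entry three-way comparison scan by a first-wins reverse index built once
-- (reading alias codes tolerantly with .get) plus a single lookup (objective: alternative
-- structure, same asymptotic cost).


-- ===== PORT A =====
-- the for-loop over .items(); each r[key] is a dict lookup that raises KeyError when the
-- key is missing — `none` here (those inputs are excluded by Pre_); comparisons are
-- evaluated lazily in Python's order
def pvLoopA (c : String) : List (String × List (String × String)) → Option String
  | [] => none
  | (iso, r) :: rest =>
    match (PySem.Dict.mk r).get? "639-2B" with
    | none => none
    | some b =>
      if c == b then some iso else
      match (PySem.Dict.mk r).get? "639-2T" with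
      | none => none
      | some t =>
        if c == t then some iso else
        match (PySem.Dict.mk r).get? "639-1" with
        | none => none
        | some o =>
          if c == o then some iso else pvLoopA c rest

def iso_from_cldr (code : String) (iso_639_3 : List (String × List (String × String))) : Option String :=
  match PySem.Str.split? code "-" with
  | none | some [] => none   -- unreachable: the separator "-" is nonempty and split never returns []
  | some (code_ :: _) =>
    if (iso_639_3.map Prod.fst).contains code_ then some code_
    else pvLoopA code_ iso_639_3

-- ===== PORT B =====
-- one entry of the index-building loop: for each of the three keys, v = r.get(key);
-- if v is not None: index.setdefault(v, iso)
def pvAddEntry (idx : PySem.Dict String String) (p : String × List (String × String)) : PySem.Dict String String :=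
  let idx1 := match (PySem.Dict.mk p.2).get? "639-2B" with
              | some v => idx.setdefault v p.1 | none => idx
  let idx2 := match (PySem.Dict.mk p.2).get? "639-2T" with
              | some v => idx1.setdefault v p.1 | none => idx1
  match (PySem.Dict.mk p.2).get? "639-1" with
  | some v => idx2.setdefault v p.1 | none => idx2

def pvIndexB (iso_639_3 : List (String × List (String × String))) : PySem.Dict String String :=
  iso_639_3.foldl pvAddEntry PySem.Dict.empty

def iso_from_cldr_alt (code : String) (iso_639_3 : List (String × List (String × String))) : Option String :=
  match PySem.Str.split? code "-" with
  | none | some [] => none   -- unreachable, as in port A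
  | some (code_ :: _) =>
    if (iso_639_3.map Prod.fst).contains code_ then some code_
    else (pvIndexB iso_639_3).get? code_

-- ===== PRECONDITION & SPEC =====
-- entry classification w.r.t. the looked-up code c, following Python's lazy evaluation:
-- an entry RAISES when a needed alias key is missing before a match is found …
def pvEntryRaises (c : String) (r : List (String × String)) : Bool :=
  match (PySem.Dict.mk r).get? "639-2B" with
  | none => true
  | some b => !(c == b) &&
    (match (PySem.Dict.mk r).get? "639-2T" with
     | none => true
     | some t => !(c == t) && ((PySem.Dict.mk r).get? "639-1").isNone)

-- … and CONTINUES when all three alias keys are present and none matches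
def pvEntryContinues (c : String) (r : List (String × String)) : Bool :=
  match (PySem.Dict.mk r).get? "639-2B", (PySem.Dict.mk r).get? "639-2T",
        (PySem.Dict.mk r).get? "639-1" with
  | some b, some t, some o => !(c == b) && !(c == t) && !(c == o)
  | _, _, _ => false

-- Pre_ excludes exactly the inputs on which A raises KeyError: the code's prefix is not a
-- key of the dict, and some entry reached before any match lacks one of the alias keys
-- "639-2B"/"639-2T"/"639-1" (lazily, in Python's evaluation order).
def Pre_iso_from_cldr (code : String) (iso_639_3 : List (String × List (String × String))) : Prop :=
  ((PySem.Str.split? code "-").getD []).headD "" ∈ iso_639_3.map Prod.fst ∨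
  ∀ i (_ : i < iso_639_3.length),
    ((iso_639_3.take i).all
      (fun p => pvEntryContinues (((PySem.Str.split? code "-").getD []).headD "") p.2)) = true →
    pvEntryRaises (((PySem.Str.split? code "-").getD []).headD "") (iso_639_3[i].2) = false

instance (code : String) (iso_639_3 : List (String × List (String × String))) : Decidable (Pre_iso_from_cldr code iso_639_3) := by
  unfold Pre_iso_from_cldr; infer_instance

def pvWitness_iso_from_cldr : String × (List (String × List (String × String))) :=
  ("fr-CA", [("fra", [("639-2B", "fre"), ("639-2T", "fra"), ("639-1", "fr")]),
             ("eng", [("639-2B", "eng"), ("639-2T", "eng"), ("639-1", "en")])])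

def Spec_iso_from_cldr (code : String) (iso_639_3 : List (String × List (String × String))) (out : Option String) : Prop := out = iso_from_cldr_alt code iso_639_3
instance (code : String) (iso_639_3 : List (String × List (String × String))) (out : Option String) : Decidable (Spec_iso_from_cldr code iso_639_3 out) := by unfold Spec_iso_from_cldr; infer_instance

-- ===== CLAIM (what is proved, stated in full; the proofs are below) =====
def Claim_equal_iso_from_cldr : Prop := ∀ (code : String) (iso_639_3 : List (String × List (String × String))), Dom_iso_from_cldr code iso_639_3 → Pre_iso_from_cldr code iso_639_3 → Spec_iso_from_cldr code iso_639_3 (iso_from_cldr code iso_639_3)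


-- ===== LEMMAS AND PROOFS =====

-- an entry hits when one of its present alias codes equals c
def pvEntryHas (c : String) (r : List (String × String)) : Bool :=
  (match (PySem.Dict.mk r).get? "639-2B" with | some b => c == b | none => false) ||
  (match (PySem.Dict.mk r).get? "639-2T" with | some t => c == t | none => false) ||
  (match (PySem.Dict.mk r).get? "639-1" with | some o => c == o | none => false)

theorem pvGet?_setdefault_or (idx : PySem.Dict String String) (k v c : String) :
    (idx.setdefault k v).get? c = (idx.get? c).or (if c = k then some v else none) := by
  by_cases h : c = k
  · subst h
    rw [PySem.Dict.get?_setdefault_self]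
    cases hv : idx.get? c <;> simp [Option.or]
  · rw [PySem.Dict.get?_setdefault_of_ne idx v h]
    simp [h]

theorem pvAddEntry_get? (c : String) (idx : PySem.Dict String String)
    (p : String × List (String × String)) :
    (pvAddEntry idx p).get? c =
      (idx.get? c).or (if pvEntryHas c p.2 then some p.1 else none) := by
  unfold pvAddEntry pvEntryHas
  cases hB : (PySem.Dict.mk p.2).get? "639-2B" <;>
  cases hT : (PySem.Dict.mk p.2).get? "639-2T" <;>
  cases hO : (PySem.Dict.mk p.2).get? "639-1" <;>
    simp only [pvGet?_setdefault_or, Option.or_assoc] <;>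
    cases hv : idx.get? c <;>
    split_ifs <;>
    simp_all [Bool.or_eq_true, beq_iff_eq, Option.or]

theorem pvFold_some (c v : String) :
    ∀ (tl : List (String × List (String × String))) (idx : PySem.Dict String String),
      idx.get? c = some v → (tl.foldl pvAddEntry idx).get? c = some v := by
  intro tl
  induction tl with
  | nil => intro idx h; simpa using h
  | cons hd tl ih =>
    intro idx h
    simp only [List.foldl_cons]
    exact ih _ (by rw [pvAddEntry_get?, h]; rfl)

theorem pvEntry_return (c : String) (r : List (String × String))
    (hr : pvEntryRaises c r = false) (hc : pvEntryContinues c r = false) :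
    pvEntryHas c r = true ∧
      ∀ (iso : String) (tl : List (String × List (String × String))),
        pvLoopA c ((iso, r) :: tl) = some iso := by
  unfold pvEntryRaises at hr
  unfold pvEntryContinues at hc
  unfold pvEntryHas
  cases hB : (PySem.Dict.mk r).get? "639-2B" <;>
  cases hT : (PySem.Dict.mk r).get? "639-2T" <;>
  cases hO : (PySem.Dict.mk r).get? "639-1" <;>
    rw [hB] at hr hc <;>
    simp only [hT, hO] at hr hc <;>
    simp_all [pvLoopA] <;>
    tauto

theorem pvEntry_continue (c : String) (r : List (String × String))
    (hc : pvEntryContinues c r = true) :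
    pvEntryHas c r = false ∧
      ∀ (iso : String) (tl : List (String × List (String × String))),
        pvLoopA c ((iso, r) :: tl) = pvLoopA c tl := by
  unfold pvEntryContinues at hc
  unfold pvEntryHas
  cases hB : (PySem.Dict.mk r).get? "639-2B" <;>
  cases hT : (PySem.Dict.mk r).get? "639-2T" <;>
  cases hO : (PySem.Dict.mk r).get? "639-1" <;>
    rw [hB] at hc <;>
    simp only [hT, hO] at hc <;>
    simp_all [pvLoopA]

theorem pvBuild (c : String) :
    ∀ (d : List (String × List (String × String))) (idx : PySem.Dict String String),
      (∀ i (_ : i < d.length),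
        ((d.take i).all (fun p => pvEntryContinues c p.2)) = true →
        pvEntryRaises c (d[i].2) = false) →
      (d.foldl pvAddEntry idx).get? c = (idx.get? c).or (pvLoopA c d) := by
  intro d
  induction d with
  | nil => intro idx _; simp [pvLoopA]
  | cons hd tl ih =>
    intro idx H
    obtain ⟨iso, r⟩ := hd
    have hr : pvEntryRaises c r = false := by simpa using H 0 (by simp) (by simp)
    by_cases hc : pvEntryContinues c r = true
    · obtain ⟨hhas, hloop⟩ := pvEntry_continue c r hc
      have H' : ∀ i (_ : i < tl.length),
          ((tl.take i).all (fun p => pvEntryContinues c p.2)) = true →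
          pvEntryRaises c (tl[i].2) = false := by
        intro i hi hall
        have := H (i + 1) (by simpa using Nat.succ_lt_succ hi)
          (by simpa [List.take_succ_cons, hc] using hall)
        simpa using this
      rw [List.foldl_cons, ih _ H', pvAddEntry_get?, hhas, hloop]
      simp
    · obtain ⟨hhas, hloop⟩ := pvEntry_return c r hr (by simpa using hc)
      have hstep : (pvAddEntry idx (iso, r)).get? c = (idx.get? c).or (some iso) := by
        rw [pvAddEntry_get?]; simp [hhas]
      rw [List.foldl_cons, hloop]
      cases hv : idx.get? c with
      | none =>
        rw [pvFold_some c iso tl _ (by rw [hstep, hv]; rfl)]; rfl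
      | some v =>
        rw [pvFold_some c v tl _ (by rw [hstep, hv]; rfl)]; rfl

-- ===== VERDICT (by name: the statement is the Claim_ definition above) =====
theorem iso_from_cldr_spec : Claim_equal_iso_from_cldr := by
  intro code d _ hpre
  unfold Spec_iso_from_cldr iso_from_cldr iso_from_cldr_alt
  cases hs : PySem.Str.split? code "-" with
  | none => rfl
  | some l =>
    cases l with
    | nil => rfl
    | cons c rest =>
      dsimp only
      by_cases hk : (d.map Prod.fst).contains c = true
      · rw [if_pos hk, if_pos hk]
      · rw [if_neg hk, if_neg hk]
        unfold Pre_iso_from_cldr at hpre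
        rw [hs] at hpre
        simp only [Option.getD_some, List.headD_cons] at hpre
        rcases hpre with hmem | H
        · exact absurd (by simpa using hmem) hk
        · rw [pvIndexB, pvBuild c d _ H]
          simp [Option.or]
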